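-- pv_equiv track=rewrite | github.com/thierryxdp/TCC | problems/820/solution_96501.py | ultima_vogal
-- ===== SOURCE A (Python) =====
-- def ultima_vogal(palavra):
--     '''retorna a ultima vogal da palavra
--     str->str'''
--     i=0
--     vogal=''
--     while i<len(palavra):
--         if palavra[i] in 'AEIOUaeiou':
--             vogal=palavra[i]
--         i=i+1
--     return vogal
-- ===== SOURCE B (Python) =====
-- def ultima_vogal(palavra):
--     '''retorna a ultima vogal da palavra
--     str->str'''
--     for i in range(len(palavra) - 1, -1, -1):
--         if palavra[i] in 'AEIOUaeiou':
--             return palavra[i]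
--     return ''
-- ===== Notes on version B (the rewrite author's own statement) =====
-- stated objective: faster
-- what changed: B scans the word from the end and returns the first vowel met immediately (early return, no accumulator), instead of A's full forward scan keeping the last vowel seen.
import Mathlib
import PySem

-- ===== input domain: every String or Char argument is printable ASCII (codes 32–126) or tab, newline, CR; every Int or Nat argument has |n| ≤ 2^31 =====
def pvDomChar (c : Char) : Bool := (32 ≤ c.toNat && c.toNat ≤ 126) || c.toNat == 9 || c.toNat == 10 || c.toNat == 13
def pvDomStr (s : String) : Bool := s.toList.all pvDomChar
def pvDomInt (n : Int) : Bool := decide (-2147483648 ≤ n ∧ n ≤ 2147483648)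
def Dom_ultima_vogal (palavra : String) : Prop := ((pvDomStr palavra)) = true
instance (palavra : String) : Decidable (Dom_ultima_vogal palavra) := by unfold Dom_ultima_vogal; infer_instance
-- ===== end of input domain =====

-- B scans the word from the end and early-returns the first vowel met; A scans forward keeping the last vowel seen. Equal results, proved below.

-- ===== PORT A =====
-- the vowel string 'AEIOUaeiou' as a list of chars; `c ∈ pvVogais` is Python's `palavra[i] in 'AEIOUaeiou'` for a single char
def pvVogais : List Char := "AEIOUaeiou".toList

-- A's while loop walks i = 0 .. len-1 visiting each character in order with an accumulator `vogal`
def ultima_vogal (palavra : String) : String :=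
  palavra.toList.foldl (fun vogal c => if c ∈ pvVogais then String.ofList [c] else vogal) ""

-- ===== PORT B =====
-- B's reverse loop with early return: first vowel of the reversed character list
def pvRevScan : List Char → String
  | [] => ""
  | c :: rest => if c ∈ pvVogais then String.ofList [c] else pvRevScan rest

def ultima_vogal_alt (palavra : String) : String :=
  pvRevScan palavra.toList.reverse

-- ===== PRECONDITION & SPEC =====
def Spec_ultima_vogal (palavra : String) (out : String) : Prop := out = ultima_vogal_alt palavra
instance (palavra : String) (out : String) : Decidable (Spec_ultima_vogal palavra out) := by unfold Spec_ultima_vogal; infer_instance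

-- ===== CLAIM (what is proved, stated in full; the proofs are below) =====
def Claim_equal_ultima_vogal : Prop := ∀ (palavra : String), Dom_ultima_vogal palavra → Spec_ultima_vogal palavra (ultima_vogal palavra)

-- ===== LEMMAS AND PROOFS =====

-- a one-character string is never empty
theorem pv_mk_singleton_ne (c : Char) : String.ofList [c] ≠ "" := by
  intro h
  have h2 := congrArg String.length h
  simp at h2

-- appending a character gives it LOWEST priority in the reverse scan
theorem pvRevScan_append (xs : List Char) (c : Char) :
    pvRevScan (xs ++ [c]) =
      if pvRevScan xs = "" then (if c ∈ pvVogais then String.ofList [c] else "") else pvRevScan xs := by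
  induction xs with
  | nil => simp [pvRevScan]
  | cons d rest ih =>
      by_cases hd : d ∈ pvVogais
      · simp [pvRevScan, hd, pv_mk_singleton_ne d]
      · simp [pvRevScan, hd, ih]

-- A's forward fold equals the reverse scan, falling back to the accumulator when no vowel is found
theorem pv_fold_eq (l : List Char) :
    ∀ acc : String,
      l.foldl (fun vogal c => if c ∈ pvVogais then String.ofList [c] else vogal) acc =
        (if pvRevScan l.reverse = "" then acc else pvRevScan l.reverse) := by
  induction l with
  | nil => intro acc; simp [pvRevScan]
  | cons c rest ih =>
      intro acc
      have hrev : (c :: rest).reverse = rest.reverse ++ [c] := by simp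
      rw [List.foldl_cons, ih, hrev, pvRevScan_append]
      by_cases h0 : pvRevScan rest.reverse = ""
      · by_cases hc : c ∈ pvVogais
        · simp [h0, hc, pv_mk_singleton_ne c]
        · simp [h0, hc]
      · simp [h0]

-- ===== VERDICT (by name: the statement is the Claim_ definition above) =====
theorem ultima_vogal_spec : Claim_equal_ultima_vogal := by
  intro palavra _
  unfold Spec_ultima_vogal ultima_vogal ultima_vogal_alt
  rw [pv_fold_eq]
  by_cases h : pvRevScan palavra.toList.reverse = "" <;> simp [h]
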